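-- pv_equiv track=rewrite | github.com/Frosmin/CodeForces | E_Digit_Sum_Divisible_2.py | solve
-- ===== SOURCE A (Python) =====
-- def solve(n):
--     # Convertimos n a string para trabajar con sus dígitos
--     n_str = str(n)
--
--     # Si n ya tiene suma de dígitos par, devolvemos n
--     digit_sum = sum(int(digit) for digit in n_str)
--     if digit_sum % 2 == 0:
--         return n
--
--     # Si la suma es impar, necesitamos encontrar un número cercano con suma par
--
--     # Intentamos aumentar un dígito
--     for i in range(len(n_str)):
--         # Empezamos desde el final para minimizar el cambio
--         pos = len(n_str) - 1 - i
--         digit = int(n_str[pos])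
--
--         # Si incrementar este dígito cambia la paridad de la suma
--         # (incrementar un dígito añade +1 a la suma, cambiando la paridad)
--         if digit < 9:
--             new_n = int(n_str[:pos] + str(digit + 1) + '0' * i)
--             return new_n
--
--     # Si no podemos incrementar, añadimos un 1 al principio y ajustamos
--     return int('1' + '0' * len(n_str))
-- ===== SOURCE B (Python) =====
-- def solve(n):
--     # An odd digit sum is fixed by adding 1: A's "increment the rightmost
--     # non-9 digit and zero the trailing digits" (plus the all-9s fallback)
--     # is exactly integer increment with carry.
--     if sum(int(d) for d in str(n)) % 2 == 0:
--         return n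
--     return n + 1
-- ===== Notes on version B (the rewrite author's own statement) =====
-- stated objective: simpler
-- what changed: B computes the digit sum once and returns n or n+1 directly, replacing A's rightmost-non-9 digit-scanning loop with string slicing/reconstruction and the all-9s fallback by the single arithmetic identity 'increment-with-carry = n+1'.
import Mathlib
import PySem

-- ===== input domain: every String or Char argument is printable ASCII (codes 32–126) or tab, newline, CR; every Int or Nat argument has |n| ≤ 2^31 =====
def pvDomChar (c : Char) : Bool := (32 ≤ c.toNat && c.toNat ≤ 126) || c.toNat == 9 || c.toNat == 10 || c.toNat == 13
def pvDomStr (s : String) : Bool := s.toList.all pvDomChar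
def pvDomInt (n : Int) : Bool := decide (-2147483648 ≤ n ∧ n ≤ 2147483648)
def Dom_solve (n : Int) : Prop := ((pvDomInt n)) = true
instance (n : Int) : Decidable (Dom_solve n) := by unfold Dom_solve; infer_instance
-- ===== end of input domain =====

-- B replaces A's rightmost-non-9 digit-scan-and-rebuild loop by the arithmetic identity
-- "increment rightmost non-9 digit and zero the trailing 9s = n + 1" (objective: simpler).

-- ===== PORT A =====
-- int(s) on a 1-char / digit string is PySem.Int.ofStr? s = PySem.Int.ofChars? s.toList
-- (PySem.Int.ofStr?.eq_1); the ports work on the character list of str(n) and apply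
-- PySem.Int.ofChars? directly.  '.getD 0' discharges the Option: on the admitted inputs
-- (Pre_solve, digit characters only) int() never raises.

-- the 'for i in range(len(n_str))' loop with its early return, one step per remaining index
def solveLoop (nStr : List Char) : List Int → Option Int
  | [] => none
  | i :: is =>
    -- pos = len(n_str) - 1 - i
    let pos : Int := PySem.Chars.len nStr - 1 - i
    -- digit = int(n_str[pos])
    let digit : Int := (PySem.Int.ofChars? [PySem.List.pyGetD nStr pos ' ']).getD 0
    if digit < 9 then
      -- new_n = int(n_str[:pos] + str(digit + 1) + '0' * i) ; return new_n
      some ((PySem.Int.ofChars? (PySem.List.slice nStr none (some pos) ++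
              (PySem.Int.toStr (digit + 1)).toList ++ PySem.List.pyRepeat ['0'] i)).getD 0)
    else solveLoop nStr is

def solve (n : Int) : Int :=
  let nStr := (PySem.Int.toStr n).toList
  let digitSum := (nStr.map (fun d => (PySem.Int.ofChars? [d]).getD 0)).sum
  if PySem.Int.mod digitSum 2 = 0 then n
  else
    match solveLoop nStr (PySem.List.pyRange 0 (PySem.Chars.len nStr) 1) with
    | some v => v
    | none => (PySem.Int.ofChars? ('1' :: PySem.List.pyRepeat ['0'] (PySem.Chars.len nStr))).getD 0

-- ===== PORT B =====
def solve_alt (n : Int) : Int :=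
  let s := (PySem.Int.toStr n).toList
  if PySem.Int.mod ((s.map (fun d => (PySem.Int.ofChars? [d]).getD 0)).sum) 2 = 0 then n
  else n + 1

-- ===== PRECONDITION & SPEC =====
-- Pre_ excludes n < 0: there str(n) starts with '-' and A raises ValueError at int('-').
def Pre_solve (n : Int) : Prop := 0 ≤ n
instance (n : Int) : Decidable (Pre_solve n) := by unfold Pre_solve; infer_instance

def pvWitness_solve : Int := 7

def Spec_solve (n : Int) (out : Int) : Prop := out = solve_alt n
instance (n : Int) (out : Int) : Decidable (Spec_solve n out) := by unfold Spec_solve; infer_instance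

-- ===== CLAIM (what is proved, stated in full; the proofs are below) =====
def Claim_equal_solve : Prop := ∀ (n : Int), Dom_solve n → Pre_solve n → Spec_solve n (solve n)

-- ===== LEMMAS AND PROOFS =====

-- ---- a copy of the digit-string parser inside PySem.Int.ofChars? (private there), used
-- ---- to reason about int() on the digit strings A builds; it is connected to the private
-- ---- function by unification in parseDigitsCons below, not by re-proving library facts.
def dvGo : List Char → Bool → Nat → Option Nat
  | [], afterDigit, acc => if afterDigit = true then some acc else none
  | c :: rest, afterDigit, acc =>
    if c.isDigit = true then dvGo rest true (acc * 10 + (c.toNat - '0'.toNat))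
    else
      if c = '_' ∧ afterDigit = true then
        match rest with
        | d :: _ => if d.isDigit = true then dvGo rest false acc else none
        | [] => none
      else none

theorem dvGo_eq (g : List Char → Bool → Nat → Option Nat)
    (h0 : ∀ b a, g [] b a = if b = true then some a else none)
    (h1 : ∀ c rest b a, g (c :: rest) b a =
       if c.isDigit = true then g rest true (a * 10 + (c.toNat - '0'.toNat))
       else if c = '_' ∧ b = true then
         (match rest with
          | d :: _ => if d.isDigit = true then g rest false a else none
          | [] => none)
       else none) :
    ∀ l b a, g l b a = dvGo l b a := by
  intro l
  induction l with
  | nil => intro b a; rw [h0]; rfl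
  | cons c rest ih =>
    intro b a
    rw [h1]
    simp only [dvGo]
    by_cases hd : c.isDigit = true
    · simp only [hd, ih]
    · simp only [hd]
      simp only [Bool.false_eq_true, if_false]
      by_cases hu : c = '_' ∧ b = true
      · simp only [hu]
        cases rest with
        | nil => rfl
        | cons d tl =>
          by_cases hdd : d.isDigit = true
          · simp [hdd, ih]
          · simp [hdd]
      · simp [hu]

-- 'int(c0 ++ cs)' for a fixed head digit c0: anything satisfying the parser's equations
-- agrees with dvGo; instantiated at the private parser by 'fun cs => rfl' below.
theorem parseDigitsCons (h : List Char → Option Nat) (g : List Char → Bool → Nat → Option Nat)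
    (c0 : Char) (k : Nat)
    (hh : ∀ cs, h (c0 :: cs) = g cs true k)
    (h0 : ∀ b a, g [] b a = if b = true then some a else none)
    (h1 : ∀ c rest b a, g (c :: rest) b a =
       if c.isDigit = true then g rest true (a * 10 + (c.toNat - '0'.toNat))
       else if c = '_' ∧ b = true then
         (match rest with
          | d :: _ => if d.isDigit = true then g rest false a else none
          | [] => none)
       else none)
    (cs : List Char) (v : Int)
    (hv : (dvGo cs true k).map (fun (a : Nat) => (a : Int)) = some v) :
    Option.map (fun n => n) (h (c0 :: cs) >>= fun a => pure ((a : Int))) = some v := by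
  rw [hh, dvGo_eq g h0 h1]
  cases hw : dvGo cs true k with
  | none => rw [hw] at hv; simp at hv
  | some a => rw [hw] at hv; simp at hv ⊢; exact hv

theorem dropWhile_no_space (l : List Char) (h : ∀ x ∈ l, PySem.Int.isIntSpace x = false) :
    List.dropWhile PySem.Int.isIntSpace l = l := by
  cases l with
  | nil => rfl
  | cons a t => simp [h a (by simp)]

-- the numeric value of a digit list, most significant first
def valD (ds : List Nat) : Nat := ds.foldl (fun a d => a * 10 + d) 0

theorem digitChar_not_space (d : Nat) (h : d < 10) :
    PySem.Int.isIntSpace (Nat.digitChar d) = false := by interval_cases d <;> decide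

theorem digitChar_ne_minus (d : Nat) (h : d < 10) : Nat.digitChar d ≠ '-' := by
  interval_cases d <;> decide

theorem digitChar_ne_plus (d : Nat) (h : d < 10) : Nat.digitChar d ≠ '+' := by
  interval_cases d <;> decide

theorem digitChar_isDigit (d : Nat) (h : d < 10) : (Nat.digitChar d).isDigit = true := by
  interval_cases d <;> decide

theorem digitChar_toNat (d : Nat) (h : d < 10) : (Nat.digitChar d).toNat - '0'.toNat = d := by
  interval_cases d <;> decide

theorem dvGo_digits (ds : List Nat) (h : ∀ d ∈ ds, d < 10) : ∀ a,
    dvGo (ds.map Nat.digitChar) true a = some (ds.foldl (fun a d => a * 10 + d) a) := by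
  induction ds with
  | nil => intro a; rfl
  | cons d tl ih =>
    intro a
    simp only [List.map_cons, dvGo, digitChar_isDigit d (h d (by simp)), if_true]
    rw [digitChar_toNat d (h d (by simp))]
    simp only [List.foldl_cons]
    exact ih (fun x hx => h x (by simp [hx])) _

-- int() of a pure digit string (as all strings A builds are, on Pre_) is its value
theorem ofChars?_mapDigitChar (ds : List Nat) (hd : ∀ d ∈ ds, d < 10) (hne : ds ≠ []) :
    PySem.Int.ofChars? (ds.map Nat.digitChar) = some ((valD ds : Nat) : Int) := by
  obtain ⟨d, tl, rfl⟩ : ∃ d tl, ds = d :: tl := by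
    cases ds with
    | nil => exact absurd rfl hne
    | cons a b => exact ⟨a, b, rfl⟩
  have hns : ∀ x ∈ (d :: tl).map Nat.digitChar, PySem.Int.isIntSpace x = false := by
    intro x hx
    obtain ⟨e, he, rfl⟩ := List.mem_map.mp hx
    exact digitChar_not_space e (hd e he)
  rw [PySem.Int.ofChars?.eq_def]
  rw [dropWhile_no_space _ hns]
  rw [dropWhile_no_space _ (by intro x hx; exact hns x (List.mem_reverse.mp hx))]
  rw [List.reverse_reverse]
  simp only [List.map_cons]
  split
  case _ heq =>
    exact absurd (by simpa using congrArg List.head? heq)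
      (digitChar_ne_minus d (hd d (by simp)))
  case _ heq =>
    exact absurd (by simpa using congrArg List.head? heq)
      (digitChar_ne_plus d (hd d (by simp)))
  case _ =>
    have htl : ∀ e ∈ tl, e < 10 := fun e he => hd e (by simp [he])
    have hv : ∀ dd : Nat, (dvGo (List.map Nat.digitChar tl) true dd).map (fun (a : Nat) => (a : Int))
        = some ((tl.foldl (fun a e => a * 10 + e) dd : Nat) : Int) := by
      intro dd; rw [dvGo_digits tl htl dd]; rfl
    have hvd : ((valD (d :: tl) : Nat) : Int)
        = ((tl.foldl (fun a e => a * 10 + e) d : Nat) : Int) := by simp [valD]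
    rw [hvd]
    have hd0 : d < 10 := hd d (by simp)
    interval_cases d <;>
      exact parseDigitsCons _ _ _ _ (fun cs => rfl) (fun b a => rfl) (fun c rest b a => rfl)
        _ _ (hv _)

theorem ofChars?_single (e : Nat) (he : e < 10) :
    PySem.Int.ofChars? [Nat.digitChar e] = some ((e : Nat) : Int) := by
  have := ofChars?_mapDigitChar [e] (by intro d hd; simp at hd; omega) (by simp)
  simpa [valD] using this

-- ---- the decimal digits of a natural number, most significant first
def decDigits (m : Nat) : List Nat :=
  if m < 10 then [m] else decDigits (m / 10) ++ [m % 10]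
decreasing_by exact Nat.div_lt_self (by omega) (by omega)

theorem decDigits_lt (m : Nat) : ∀ e ∈ decDigits m, e < 10 := by
  induction m using Nat.strong_induction_on with
  | _ m ih =>
    rw [decDigits]
    split
    · intro e he; simp at he; omega
    · intro e he
      simp only [List.mem_append, List.mem_singleton] at he
      rcases he with he | he
      · exact ih (m / 10) (Nat.div_lt_self (by omega) (by omega)) e he
      · subst he; exact Nat.mod_lt _ (by omega)

theorem decDigits_ne_nil (m : Nat) : decDigits m ≠ [] := by
  rw [decDigits]; split <;> simp

theorem foldl_val_acc (ys : List Nat) : ∀ a : Nat,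
    ys.foldl (fun a d => a * 10 + d) a = a * 10 ^ ys.length + valD ys := by
  induction ys with
  | nil => intro a; simp [valD]
  | cons y t ih =>
    intro a
    simp only [List.foldl_cons, List.length_cons, valD]
    rw [ih (a * 10 + y), ih (0 * 10 + y)]
    ring

theorem valD_append (xs ys : List Nat) :
    valD (xs ++ ys) = valD xs * 10 ^ ys.length + valD ys := by
  unfold valD
  rw [List.foldl_append]
  exact foldl_val_acc ys _

theorem valD_singleton (e : Nat) : valD [e] = e := by simp [valD]

theorem valD_replicate_zero (t : Nat) : valD (List.replicate t 0) = 0 := by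
  induction t with
  | zero => rfl
  | succ k ih =>
    have : List.replicate (k + 1) 0 = List.replicate k 0 ++ [0] := by
      rw [List.replicate_succ']
    rw [this, valD_append, ih, valD_singleton]
    simp

theorem valD_replicate_nine (t : Nat) : valD (List.replicate t 9) + 1 = 10 ^ t := by
  induction t with
  | zero => rfl
  | succ k ih =>
    have h : List.replicate (k + 1) 9 = List.replicate k 9 ++ [9] := by
      rw [List.replicate_succ']
    rw [h, valD_append, valD_singleton, List.length_singleton, pow_succ]
    omega

theorem decDigits_val (m : Nat) : valD (decDigits m) = m := by
  induction m using Nat.strong_induction_on with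
  | _ m ih =>
    rw [decDigits]
    split
    · exact valD_singleton m
    · rw [valD_append, ih (m / 10) (Nat.div_lt_self (by omega) (by omega)),
        valD_singleton, List.length_singleton, pow_one]
      omega

-- Nat.toDigits is decDigits rendered with digitChar
theorem toDigitsCore_acc (f : Nat) : ∀ (n : Nat) (l : List Char),
    Nat.toDigitsCore 10 f n l = Nat.toDigitsCore 10 f n [] ++ l := by
  induction f with
  | zero => intro n l; simp [Nat.toDigitsCore]
  | succ f ih =>
    intro n l
    simp only [Nat.toDigitsCore]
    split
    · rfl
    · rw [ih (n / 10) ((n % 10).digitChar :: l), ih (n / 10) [(n % 10).digitChar]]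
      simp

theorem toDigitsCore_eq (f : Nat) : ∀ n : Nat, n < f →
    Nat.toDigitsCore 10 f n [] = (decDigits n).map Nat.digitChar := by
  induction f with
  | zero => intro n h; omega
  | succ f ih =>
    intro n h
    simp only [Nat.toDigitsCore]
    rw [decDigits]
    split
    case _ hz =>
      have h10 : n < 10 := by
        rcases Nat.lt_or_ge n 10 with h' | h'
        · exact h'
        · exact absurd hz (by
            have : 1 ≤ n / 10 := (Nat.le_div_iff_mul_le (by omega)).mpr (by omega)
            omega)
      rw [if_pos h10]
      simp [Nat.mod_eq_of_lt h10]
    case _ hz =>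
      have hge : 10 ≤ n := by
        by_contra hlt
        exact hz (Nat.div_eq_of_lt (by omega))
      rw [if_neg (by omega)]
      rw [toDigitsCore_acc f (n / 10) [(n % 10).digitChar]]
      rw [ih (n / 10) (by
        have : n / 10 < n := Nat.div_lt_self (by omega) (by omega)
        omega)]
      simp

theorem toChars_natCast (m : Nat) :
    PySem.Int.toChars (m : Int) = (decDigits m).map Nat.digitChar := by
  simp only [PySem.Int.toChars]
  rw [if_neg (by omega)]
  have : ((m : Int)).toNat = m := Int.toNat_natCast m
  rw [this]
  show Nat.toDigitsCore 10 (m + 1) m [] = _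
  exact toDigitsCore_eq (m + 1) m (by omega)

-- str(d + 1) for a digit d < 9 is the single character of d + 1
theorem toStr_small (d : Nat) (hd : d < 9) :
    (PySem.Int.toStr ((d : Int) + 1)).toList = [Nat.digitChar (d + 1)] := by
  rw [PySem.Int.toList_toStr]
  have : ((d : Int) + 1) = ((d + 1 : Nat) : Int) := by push_cast; ring
  rw [this, toChars_natCast]
  have : decDigits (d + 1) = [d + 1] := by rw [decDigits, if_pos (by omega)]
  rw [this, List.map_singleton]

-- extracting the digit the loop looks at
theorem loop_digit (ds : List Nat) (hds : ∀ e ∈ ds, e < 10) (p : Nat) (hp : p < ds.length) :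
    (PySem.Int.ofChars? [PySem.List.pyGetD (ds.map Nat.digitChar) ((p : Nat) : Int) ' ']).getD 0
      = ((ds[p] : Nat) : Int) := by
  rw [PySem.List.pyGetD_natCast]
  have hget : (ds.map Nat.digitChar).getD p ' ' = Nat.digitChar ds[p] := by
    rw [List.getD_eq_getElem?_getD]
    simp [List.getElem?_map, List.getElem?_eq_getElem hp]
  rw [hget, ofChars?_single ds[p] (hds _ (List.getElem_mem hp))]
  rfl

-- the loop skips positions holding a 9 and fires at the rightmost non-9 digit
theorem loop_hit (pre : List Nat) (d : Nat) (t : Nat)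
    (hpre : ∀ e ∈ pre, e < 10) (hd : d < 9) :
    ∀ (k i : Nat), i + k = t →
    solveLoop ((pre ++ [d] ++ List.replicate t 9).map Nat.digitChar)
        (PySem.List.pyRange (i : Int) ((pre.length + 1 + t : Nat) : Int) 1)
      = some ((valD (pre ++ [d + 1] ++ List.replicate t 0) : Nat) : Int) := by
  intro k
  set ds := pre ++ [d] ++ List.replicate t 9 with hds_def
  have hds : ∀ e ∈ ds, e < 10 := by
    intro e he
    simp only [hds_def, List.mem_append, List.mem_singleton, List.mem_replicate] at he
    rcases he with (he | he) | he
    · exact hpre e he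
    · omega
    · omega
  have hlen : ds.length = pre.length + 1 + t := by simp [hds_def]; omega
  induction k with
  | zero =>
    intro i hi
    have hit : t = i := by omega
    subst hit
    rw [PySem.List.pyRange_one_cons (by push_cast; omega)]
    simp only [solveLoop]
    have hlen2 : PySem.Chars.len (ds.map Nat.digitChar) = ((ds.length : Nat) : Int) := by
      simp [PySem.Chars.len_eq]
    rw [hlen2]
    have hpos : ((ds.length : Nat) : Int) - 1 - (t : Int) = ((pre.length : Nat) : Int) := by
      rw [hlen]; push_cast; ring
    rw [hpos]
    have hplt : pre.length < ds.length := by omega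
    rw [loop_digit ds hds pre.length hplt]
    have hgd : ds[pre.length] = d := by
      simp only [hds_def]
      rw [List.getElem_append_left (by simp)]
      simp
    rw [hgd]
    rw [if_pos (by exact_mod_cast hd)]
    congr 1
    rw [PySem.List.slice_to_natCast]
    rw [toStr_small d hd]
    rw [PySem.List.pyRepeat_singleton]
    have h1 : (ds.map Nat.digitChar).take pre.length = pre.map Nat.digitChar := by
      simp only [hds_def, List.map_append, List.append_assoc]
      rw [List.take_left' (by simp)]
    have h2 : List.replicate ((t : Int)).toNat '0' = (List.replicate t 0).map Nat.digitChar := by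
      rw [List.map_replicate]
      simp only [Int.toNat_natCast]
      rfl
    rw [h1, h2]
    have h3 : pre.map Nat.digitChar ++ [Nat.digitChar (d + 1)] ++ (List.replicate t 0).map Nat.digitChar
        = (pre ++ [d + 1] ++ List.replicate t 0).map Nat.digitChar := by
      simp [List.map_append]
    rw [h3]
    rw [ofChars?_mapDigitChar _ (by
      intro e he
      simp only [List.mem_append, List.mem_singleton, List.mem_replicate] at he
      rcases he with (he | he) | he
      · exact hpre e he
      · omega
      · omega) (by simp)]
    rfl
  | succ k ih =>
    intro i hi
    rw [PySem.List.pyRange_one_cons (by push_cast; omega)]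
    simp only [solveLoop]
    have hlen2 : PySem.Chars.len (ds.map Nat.digitChar) = ((ds.length : Nat) : Int) := by
      simp [PySem.Chars.len_eq]
    rw [hlen2]
    have hpos : ((ds.length : Nat) : Int) - 1 - (i : Int) = ((pre.length + t - i : Nat) : Int) := by
      rw [hlen]; push_cast [Nat.cast_sub (by omega : i ≤ pre.length + t)]; ring
    rw [hpos]
    have hplt : pre.length + t - i < ds.length := by omega
    rw [loop_digit ds hds _ hplt]
    have hgd : ds[pre.length + t - i] = 9 := by
      simp only [hds_def]
      rw [List.getElem_append_right (by simp; omega)]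
      simp
    rw [hgd]
    rw [if_neg (by norm_num)]
    have hcast : ((i : Int)) + 1 = (((i + 1 : Nat)) : Int) := by push_cast; ring
    rw [hcast]
    exact ih (i + 1) (by omega)

theorem loop_none (t : Nat) :
    ∀ (k i : Nat), i + k = t →
    solveLoop ((List.replicate t 9).map Nat.digitChar)
        (PySem.List.pyRange (i : Int) ((t : Nat) : Int) 1) = none := by
  intro k
  have hds : ∀ e ∈ List.replicate t 9, e < 10 := by
    intro e he; rw [List.mem_replicate] at he; omega
  induction k with
  | zero =>
    intro i hi
    have : t = i := by omega
    subst this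
    rw [PySem.List.pyRange_one_eq_nil (by omega)]
    rfl
  | succ k ih =>
    intro i hi
    rw [PySem.List.pyRange_one_cons (by omega)]
    simp only [solveLoop]
    have hlen2 : PySem.Chars.len ((List.replicate t 9).map Nat.digitChar)
        = ((t : Nat) : Int) := by simp [PySem.Chars.len_eq]
    rw [hlen2]
    have hpos : ((t : Nat) : Int) - 1 - (i : Int) = ((t - 1 - i : Nat) : Int) := by
      push_cast [Nat.cast_sub (by omega : i ≤ t - 1), Nat.cast_sub (by omega : 1 ≤ t)]; ring
    rw [hpos]
    have hplt : t - 1 - i < (List.replicate t 9).length := by simp; omega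
    rw [loop_digit _ hds _ hplt]
    rw [List.getElem_replicate]
    rw [if_neg (by norm_num)]
    have hcast : ((i : Int)) + 1 = (((i + 1 : Nat)) : Int) := by push_cast; ring
    rw [hcast]
    exact ih (i + 1) (by omega)

theorem split9 (ds : List Nat) (hds : ∀ e ∈ ds, e < 10) :
    (∀ e ∈ ds, e = 9) ∨
    ∃ pre d t, ds = pre ++ [d] ++ List.replicate t 9 ∧ d < 9 ∧ (∀ e ∈ pre, e < 10) := by
  induction ds using List.reverseRecOn with
  | nil => left; simp
  | append_singleton xs x ih =>
    have hxs : ∀ e ∈ xs, e < 10 := fun e he => hds e (by simp [he])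
    by_cases hx : x = 9
    · subst hx
      rcases ih hxs with hall | ⟨pre, d, t, heq, hdlt, hprelt⟩
      · left; intro e he; simp at he; rcases he with he | he; exact hall e he; exact he
      · right
        refine ⟨pre, d, t + 1, ?_, hdlt, hprelt⟩
        rw [heq]
        simp [List.replicate_succ', List.append_assoc]
    · right
      exact ⟨xs, x, 0, by simp, by have := hds x (by simp); omega, hxs⟩

theorem fallback_val (L : Nat) :
    (PySem.Int.ofChars? ('1' :: PySem.List.pyRepeat ['0'] ((L : Nat) : Int))).getD 0
      = ((10 ^ L : Nat) : Int) := by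
  rw [PySem.List.pyRepeat_singleton]
  have h2 : List.replicate ((L : Int)).toNat '0' = (List.replicate L 0).map Nat.digitChar := by
    rw [List.map_replicate]
    simp only [Int.toNat_natCast]
    rfl
  rw [h2]
  have h3 : '1' :: (List.replicate L 0).map Nat.digitChar
      = ((1 :: List.replicate L 0)).map Nat.digitChar := by rfl
  rw [h3]
  rw [ofChars?_mapDigitChar _ (by
    intro e he
    simp only [List.mem_cons, List.mem_replicate] at he
    rcases he with he | he
    · omega
    · omega) (by simp)]
  have h4 : valD (1 :: List.replicate L 0) = 10 ^ L := by
    have : (1 :: List.replicate L 0) = [1] ++ List.replicate L 0 := rfl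
    rw [this, valD_append, valD_singleton, valD_replicate_zero, List.length_replicate]
    omega
  rw [h4]
  rfl

theorem solve_eq_alt (n : Int) (hn : 0 ≤ n) : solve n = solve_alt n := by
  obtain ⟨m, rfl⟩ : ∃ m : Nat, n = ↑m := ⟨n.toNat, (Int.toNat_of_nonneg hn).symm⟩
  unfold solve solve_alt
  have hcs : (PySem.Int.toStr ((m : Nat) : Int)).toList = (decDigits m).map Nat.digitChar := by
    rw [PySem.Int.toList_toStr, toChars_natCast]
  rw [hcs]
  dsimp only
  split_ifs with hc
  · rfl
  · -- odd digit sum: the loop (or the all-nines fallback) is exactly m + 1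
    clear hc
    have hds : ∀ e ∈ decDigits m, e < 10 := decDigits_lt m
    have hval : valD (decDigits m) = m := decDigits_val m
    have hne : decDigits m ≠ [] := decDigits_ne_nil m
    have hlen : PySem.Chars.len ((decDigits m).map Nat.digitChar)
        = (((decDigits m).length : Nat) : Int) := by simp [PySem.Chars.len_eq]
    rw [hlen]
    rcases split9 (decDigits m) hds with hall | ⟨pre, dd, t, hsplit, hdlt, hprelt⟩
    · -- all digits are 9: the loop returns None, the fallback is 10^len = m + 1
      have hrep : decDigits m = List.replicate (decDigits m).length 9 :=
        List.eq_replicate_of_mem hall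
      have l0 := loop_none (decDigits m).length (decDigits m).length 0 (by omega)
      rw [show (((0 : Nat)) : Int) = (0 : Int) by simp] at l0
      conv_lhs => rw [hrep]
      simp only [List.length_replicate]
      rw [l0]
      show (PySem.Int.ofChars? ('1' ::
          PySem.List.pyRepeat ['0'] (((decDigits m).length : Nat) : Int))).getD 0 = (m : Int) + 1
      rw [fallback_val]
      have h9 : valD (List.replicate (decDigits m).length 9) + 1 = 10 ^ (decDigits m).length :=
        valD_replicate_nine _
      rw [hrep] at hval
      have hmp : m + 1 = 10 ^ (decDigits m).length := by omega
      rw [← hmp]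
      push_cast
      ring
    · -- a rightmost non-9 digit exists: the loop returns the incremented number
      have l1 := loop_hit pre dd t hprelt hdlt t 0 (by omega)
      rw [show (((0 : Nat)) : Int) = (0 : Int) by simp] at l1
      rw [hsplit]
      simp only [List.length_append, List.length_replicate, List.length_cons,
        List.length_nil]
      rw [show pre.length + (0 + 1) + t = pre.length + 1 + t by omega]
      rw [l1]
      show ((valD (pre ++ [dd + 1] ++ List.replicate t 0) : Nat) : Int) = (m : Int) + 1
      have hq : valD (pre ++ [dd + 1] ++ List.replicate t 0)
          = valD (pre ++ [dd]) * 10 ^ t + 10 ^ t := by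
        rw [valD_append, valD_replicate_zero, List.length_replicate]
        have h5 : valD (pre ++ [dd + 1]) = valD (pre ++ [dd]) + 1 := by
          rw [valD_append, valD_append]
          simp [valD_singleton]
          omega
        rw [h5]
        ring
      have hm : valD (pre ++ [dd]) * 10 ^ t + (valD (List.replicate t 9)) = m := by
        conv_rhs => rw [← hval, hsplit, valD_append, List.length_replicate]
      have h9 : valD (List.replicate t 9) + 1 = 10 ^ t := valD_replicate_nine t
      rw [hq]
      have hfin : valD (pre ++ [dd]) * 10 ^ t + 10 ^ t = m + 1 := by omega
      rw [hfin]
      push_cast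
      ring

-- ===== VERDICT (by name: the statement is the Claim_ definition above) =====
theorem solve_spec : Claim_equal_solve := by
  intro n _ hpre
  unfold Spec_solve
  exact solve_eq_alt n hpre
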